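-- pv_equiv track=rewrite | github.com/hassanmuhammadyounas/metricade | packages/vector-worker/src/features.py | group_into_pages
-- ===== SOURCE A (Python) =====
-- def group_into_pages(events: list[dict]) -> list[list[dict]]:
--     """
--     Split a flat event list into pages.
--     A new page begins on every page_view or route_change event.
--     Events are assumed to be sorted by event_seq ASC.
--     """
--     if not events:
--         return []
--
--     pages: list[list[dict]] = []
--     current: list[dict] = []
--
--     for ev in events:
--         et = (ev.get('event_type') or '').lower()
--         if et in ('page_view', 'route_change') and current:
--             pages.append(current)
--             current = []
--         current.append(ev)
--
--     if current:
--         pages.append(current)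
--
--     return pages
-- ===== SOURCE B (Python) =====
-- def group_into_pages(events: list[dict]) -> list[list[dict]]:
--     """
--     Split a flat event list into pages by scanning forward from each page
--     start to the next break event and slicing, instead of accumulate-and-flush.
--     """
--     def is_break(ev):
--         return (ev.get('event_type') or '').lower() in ('page_view', 'route_change')
--
--     pages: list[list[dict]] = []
--     i, n = 0, len(events)
--     while i < n:
--         j = i + 1
--         while j < n and not is_break(events[j]):
--             j += 1
--         pages.append(events[i:j])
--         i = j
--     return pages
-- ===== Notes on version B (the rewrite author's own statement) =====
-- stated objective: alternative
-- what changed: Replaces A's accumulate-and-flush loop (building a current page and flushing it on each break event) with a cut-point scan: from each page start, advance to the next break event and slice that span out as a page.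
import Mathlib
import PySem

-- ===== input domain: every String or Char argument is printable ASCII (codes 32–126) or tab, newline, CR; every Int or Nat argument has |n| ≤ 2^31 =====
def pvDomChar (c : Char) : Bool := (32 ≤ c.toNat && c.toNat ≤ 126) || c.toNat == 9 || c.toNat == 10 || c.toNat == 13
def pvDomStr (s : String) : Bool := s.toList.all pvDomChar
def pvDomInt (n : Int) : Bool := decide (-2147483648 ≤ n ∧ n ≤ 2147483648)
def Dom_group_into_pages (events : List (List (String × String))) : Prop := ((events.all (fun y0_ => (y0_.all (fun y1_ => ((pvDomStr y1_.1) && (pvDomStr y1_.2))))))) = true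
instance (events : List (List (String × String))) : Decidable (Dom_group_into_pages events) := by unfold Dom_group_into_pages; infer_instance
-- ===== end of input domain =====

-- ===== PORT A =====
-- B restructures A's accumulate-and-flush into a scan-to-next-break-and-slice decomposition (alternative; return value only).
-- et = (ev.get('event_type') or '').lower()  — None and '' both coerce to '', so getD "" is exact
def pvEt (ev : List (String × String)) : String :=
  PySem.Str.lower (((PySem.Dict.mk ev).get? "event_type").getD "")

def pvIsBreak (ev : List (String × String)) : Bool :=
  pvEt ev == "page_view" || pvEt ev == "route_change"

-- the body of A's for-loop, over state (pages, current)
def pvStepA (st : List (List (List (String × String))) × List (List (String × String)))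
    (ev : List (String × String)) :
    List (List (List (String × String))) × List (List (String × String)) :=
  if pvIsBreak ev && !st.2.isEmpty then (st.1 ++ [st.2], [ev]) else (st.1, st.2 ++ [ev])

def group_into_pages (events : List (List (String × String))) : List (List (List (String × String))) :=
  if events.isEmpty then []
  else
    let st := events.foldl pvStepA ([], [])
    if !st.2.isEmpty then st.1 ++ [st.2] else st.1

-- ===== PORT B =====
-- the outer while loop of B: from page start e, inner scan j to the next break, slice, continue at j
def pvGoB : List (List (String × String)) → List (List (List (String × String)))
  | [] => []
  | e :: rest =>
      (e :: rest.takeWhile (fun x => !pvIsBreak x)) :: pvGoB (rest.dropWhile (fun x => !pvIsBreak x))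
termination_by l => l.length
decreasing_by
  simp only [List.length_cons]
  exact Nat.lt_succ_of_le (List.length_dropWhile_le _ _)

def group_into_pages_alt (events : List (List (String × String))) : List (List (List (String × String))) :=
  pvGoB events

-- ===== PRECONDITION & SPEC =====
def Spec_group_into_pages (events : List (List (String × String))) (out : List (List (List (String × String)))) : Prop := out = group_into_pages_alt events
instance (events : List (List (String × String))) (out : List (List (List (String × String)))) : Decidable (Spec_group_into_pages events out) := by unfold Spec_group_into_pages; infer_instance

-- ===== CLAIM (what is proved, stated in full; the proofs are below) =====
def Claim_equal_group_into_pages : Prop := ∀ (events : List (List (String × String))), Dom_group_into_pages events → Spec_group_into_pages events (group_into_pages events)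

-- ===== LEMMAS AND PROOFS =====

-- reference grouping: continue page `cur` through `l`, cutting at each break
def pvH (cur : List (List (String × String))) :
    List (List (String × String)) → List (List (List (String × String)))
  | [] => [cur]
  | e :: rest => if pvIsBreak e then cur :: pvH [e] rest else pvH (cur ++ [e]) rest

theorem pvFoldA_eq_H (l : List (List (String × String)))
    (pages : List (List (List (String × String)))) (cur : List (List (String × String)))
    (hc : cur ≠ []) :
    (let st := l.foldl pvStepA (pages, cur)
     if !st.2.isEmpty then st.1 ++ [st.2] else st.1) = pages ++ pvH cur l := by
  induction l generalizing pages cur with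
  | nil => simp [pvH, hc]
  | cons e rest ih =>
    simp only [List.foldl_cons, pvH]
    by_cases hb : pvIsBreak e
    · have h1 : pvStepA (pages, cur) e = (pages ++ [cur], [e]) := by
        simp [pvStepA, hb, hc]
      rw [h1, ih _ _ (by simp), hb]
      simp
    · have h1 : pvStepA (pages, cur) e = (pages, cur ++ [e]) := by
        simp [pvStepA, hb]
      rw [h1, ih _ _ (by simp), if_neg hb]

theorem pvH_eq_goB (l : List (List (String × String))) (cur : List (List (String × String))) :
    pvH cur l = (cur ++ l.takeWhile (fun x => !pvIsBreak x)) :: pvGoB (l.dropWhile (fun x => !pvIsBreak x)) := by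
  induction l generalizing cur with
  | nil => simp [pvH, pvGoB]
  | cons e rest ih =>
    simp only [pvH]
    by_cases hb : pvIsBreak e
    · rw [if_pos hb, ih]
      have ht : (e :: rest).takeWhile (fun x => !pvIsBreak x) = [] := by
        simp [hb]
      have hd : (e :: rest).dropWhile (fun x => !pvIsBreak x) = e :: rest := by
        simp [hb]
      rw [ht, hd, pvGoB]
      simp
    · rw [if_neg hb, ih]
      have ht : (e :: rest).takeWhile (fun x => !pvIsBreak x)
          = e :: rest.takeWhile (fun x => !pvIsBreak x) := by
        simp [hb]
      have hd : (e :: rest).dropWhile (fun x => !pvIsBreak x)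
          = rest.dropWhile (fun x => !pvIsBreak x) := by
        simp [hb]
      rw [ht, hd]
      simp

-- ===== VERDICT (by name: the statement is the Claim_ definition above) =====
theorem group_into_pages_spec : Claim_equal_group_into_pages := by
  intro events _
  unfold Spec_group_into_pages group_into_pages group_into_pages_alt
  cases events with
  | nil => simp [pvGoB]
  | cons e rest =>
    have h0 : pvStepA ([], []) e = ([], [e]) := by simp [pvStepA]
    simp only [List.isEmpty_cons, if_neg (by decide : ¬ (false = true)), List.foldl_cons, h0]
    rw [pvFoldA_eq_H rest [] [e] (by simp), pvH_eq_goB, pvGoB]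
    simp
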